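-- pv_equiv track=rewrite | github.com/TurcaVasileIonut/hero-of-recommendation | project/recomandation.py | best_matching_persons
-- ===== SOURCE A (Python) =====
-- def best_matching_persons(users_score):
--     """
--     Returns the persons with best matching score
--     users_score: dictionary
--     :return: list
--     """
--     best = 0
--     best_persons = list()
--     for person in users_score:
--         if users_score[person] > best:
--             best = users_score[person]
--             best_persons.clear()
--             best_persons.append(person)
--         elif users_score[person] == best:
--             best_persons.append(person)
--     return best_persons
-- ===== SOURCE B (Python) =====
-- def best_matching_persons(users_score):
--     """
--     Returns the persons with best matching score
--     users_score: dictionary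
--     :return: list
--     """
--     best = max(0, max(users_score.values(), default=0))
--     return [person for person, score in users_score.items() if score == best]
-- ===== Notes on version B (the rewrite author's own statement) =====
-- stated objective: idiomatic
-- what changed: A's fused running-max-and-collect loop (with clear/rebuild of the candidate list) is decomposed into two plain passes: compute the target score with max(values, default=0) floored at 0, then one filtering comprehension over the items.
import Mathlib
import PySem

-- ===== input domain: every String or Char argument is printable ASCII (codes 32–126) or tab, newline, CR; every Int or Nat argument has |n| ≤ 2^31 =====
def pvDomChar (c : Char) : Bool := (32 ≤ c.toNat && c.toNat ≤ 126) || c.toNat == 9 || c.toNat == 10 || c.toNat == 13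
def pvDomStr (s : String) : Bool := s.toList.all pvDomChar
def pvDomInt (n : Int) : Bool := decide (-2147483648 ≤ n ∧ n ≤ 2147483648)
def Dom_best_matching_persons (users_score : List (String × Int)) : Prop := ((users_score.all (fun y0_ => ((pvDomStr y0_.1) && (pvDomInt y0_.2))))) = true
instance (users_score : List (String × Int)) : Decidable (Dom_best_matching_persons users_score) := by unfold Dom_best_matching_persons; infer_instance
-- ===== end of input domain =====

-- B replaces A's fused running-max-and-collect loop by two plain passes: compute the
-- target score (max of the values, floored at 0), then filter the items once (idiomatic).

-- ===== PORT A =====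
-- A iterates over the dict's keys and looks each key up; the lookup can never miss
-- (the keys come from the dict itself), so getD's default 0 is never consulted.
def best_matching_persons (users_score : List (String × Int)) : List String :=
  let d : PySem.Dict String Int := PySem.Dict.mk users_score
  (d.keys.foldl
    (fun (st : Int × List String) person =>
      let s := d.getD person 0
      if s > st.1 then (s, [person])
      else if s == st.1 then (st.1, st.2 ++ [person])
      else st)
    (0, [])).2

-- ===== PORT B =====
def best_matching_persons_alt (users_score : List (String × Int)) : List String :=
  let best := max 0 (PySem.List.maxD (users_score.map Prod.snd) (fun y => y) 0)
  (users_score.filter (fun kv => kv.2 == best)).map Prod.fst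

-- ===== PRECONDITION & SPEC =====
-- Pre_ requires pairwise-distinct keys: the association list stands for a Python dict,
-- which cannot hold duplicate keys, so duplicate-key lists represent no valid input of A.
def Pre_best_matching_persons (users_score : List (String × Int)) : Prop :=
  (users_score.map Prod.fst).Nodup
instance (users_score : List (String × Int)) : Decidable (Pre_best_matching_persons users_score) := by unfold Pre_best_matching_persons; infer_instance

def pvWitness_best_matching_persons : (List (String × Int)) := [("ann", 2), ("bob", 2), ("cy", -1)]

def Spec_best_matching_persons (users_score : List (String × Int)) (out : List String) : Prop := out = best_matching_persons_alt users_score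
instance (users_score : List (String × Int)) (out : List String) : Decidable (Spec_best_matching_persons users_score out) := by unfold Spec_best_matching_persons; infer_instance

-- ===== CLAIM (what is proved, stated in full; the proofs are below) =====
def Claim_equal_best_matching_persons : Prop := ∀ (users_score : List (String × Int)), Dom_best_matching_persons users_score → Pre_best_matching_persons users_score → Spec_best_matching_persons users_score (best_matching_persons users_score)

-- ===== LEMMAS AND PROOFS =====

-- A's loop body, written on the (key, value) pairs directly.
def pvStepA (st : Int × List String) (kv : String × Int) : Int × List String :=
  if kv.2 > st.1 then (kv.2, [kv.1])
  else if kv.2 == st.1 then (st.1, st.2 ++ [kv.1])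
  else st

-- the running maximum of the values, started at `best`
def pvM (l : List (String × Int)) (best : Int) : Int :=
  l.foldl (fun m kv => max m kv.2) best

theorem pvM_cons (kv : String × Int) (t : List (String × Int)) (b : Int) :
    pvM (kv :: t) b = pvM t (max b kv.2) := rfl

theorem le_pvM (l : List (String × Int)) (b : Int) : b ≤ pvM l b :=
  (PySem.List.le_foldl_max_int l Prod.snd b).1

-- characterisation of A's fold: final best = running max; final list = (kept prefix) ++ keys of maximal pairs
theorem pvLoopA (l : List (String × Int)) (best : Int) (bp : List String) :
    l.foldl pvStepA (best, bp) =
      (pvM l best,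
       (if pvM l best = best then bp else []) ++
         (l.filter (fun kv => kv.2 == pvM l best)).map Prod.fst) := by
  induction l generalizing best bp with
  | nil => simp [pvM]
  | cons kv t ih =>
    rw [List.foldl_cons, pvM_cons]
    by_cases h1 : kv.2 > best
    · rw [show pvStepA (best, bp) kv = (kv.2, [kv.1]) by simp [pvStepA, h1]]
      rw [ih]
      have hb : max best kv.2 = kv.2 := by omega
      rw [hb]
      have hM : ¬ pvM t kv.2 = best := by have := le_pvM t kv.2; omega
      have hM2 : best < pvM t kv.2 := by have := le_pvM t kv.2; omega
      simp only [List.filter_cons, hM, if_false, List.nil_append]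
      by_cases h2 : pvM t kv.2 = kv.2
      · simp [h2]
      · have : (kv.2 == pvM t kv.2) = false := by simp; omega
        simp [this, h2]
    · have hb : max best kv.2 = best := by omega
      rw [hb]
      by_cases h2 : kv.2 = best
      · rw [show pvStepA (best, bp) kv = (best, bp ++ [kv.1]) by simp [pvStepA, h2]]
        rw [ih]
        simp only [List.filter_cons]
        by_cases h3 : pvM t best = best
        · simp [h3, h2]
        · have : (kv.2 == pvM t best) = false := by
            simp; have := le_pvM t best; omega
          simp [h3, this]
      · rw [show pvStepA (best, bp) kv = (best, bp) by simp [pvStepA, h2]; omega]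
        rw [ih]
        have : (kv.2 == pvM t best) = false := by
          simp; have := le_pvM t best; omega
        simp [this]

-- A's key-lookup loop is the pair loop, given distinct keys
theorem pvA_eq_pairFold (l : List (String × Int)) (hnd : (l.map Prod.fst).Nodup) :
    best_matching_persons l = (l.foldl pvStepA (0, [])).2 := by
  unfold best_matching_persons
  simp only [PySem.Dict.keys_mk, List.foldl_map]
  congr 1
  apply PySem.List.foldl_congr_mem
  intro acc kv hkv
  have hget : (PySem.Dict.mk l).getD kv.1 0 = kv.2 :=
    PySem.Dict.getD_of_mem_items (PySem.Dict.mk l)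
      (by simpa using hkv) (by simpa [PySem.Dict.keys_mk] using hnd) 0
  simp only [hget, pvStepA]

-- foldl max commutes with an outer max
theorem pvFoldlMax_comm (t : List Int) (a x : Int) :
    t.foldl max (max a x) = max a (t.foldl max x) := by
  induction t generalizing x with
  | nil => simp
  | cons y t ih => simp only [List.foldl_cons, max_assoc, ih]

-- B's target score equals A's running maximum started at 0
theorem pvBest_eq (l : List (String × Int)) :
    max 0 (PySem.List.maxD (l.map Prod.snd) (fun y => y) 0) = pvM l 0 := by
  have : pvM l 0 = (l.map Prod.snd).foldl max 0 := by
    simp [pvM, List.foldl_map]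
  rw [this]
  cases hm : l.map Prod.snd with
  | nil => simp [PySem.List.maxD, PySem.List.max?]
  | cons x t =>
    rw [show PySem.List.maxD (x :: t) (fun y => y) 0 = t.foldl max x by
      simp [PySem.List.maxD, PySem.List.max?_id_cons]]
    rw [List.foldl_cons, show max 0 x = max 0 x from rfl, pvFoldlMax_comm]

-- ===== VERDICT (by name: the statement is the Claim_ definition above) =====
theorem best_matching_persons_spec : Claim_equal_best_matching_persons := by
  intro l _ hpre
  unfold Spec_best_matching_persons best_matching_persons_alt
  rw [pvA_eq_pairFold l hpre, pvLoopA, pvBest_eq]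
  simp
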